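-- pv_equiv track=rewrite | github.com/Mushinako/Google-Code-Jam-2022 | 1-1A/1-Double or One Thing/sol.py | _double_or_one_thing
-- ===== SOURCE A (Python) =====
-- def _double_or_one_thing(s: str) -> str:
--     """"""
--     # Keep track of indices that should be duplicated
--     dup_indices: set[int] = set()
--     # Keep track of indices of repeating letters
--     reps: set[int] = set()
--     for i, c in enumerate(s[:-1]):
--         # Compare current and next char
--         next_c = s[i + 1]
--         # If next char is smaller, don't repeat
--         if c > next_c:
--             reps = set()
--             continue
--         # If current char is smaller, repeat
--         if c < next_c:
--             dup_indices |= reps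
--             dup_indices.add(i)
--             reps = set()
--             continue
--         # If the chars are the same, keep track of it
--         reps.add(i)
--     # Construct the string
--     cs: list[str] = []
--     for i, c in enumerate(s):
--         cs.append(c)
--         if i in dup_indices:
--             cs.append(c)
--     return "".join(cs)
-- ===== SOURCE B (Python) =====
-- def _double_or_one_thing(s: str) -> str:
--     # One right-to-left pass with a boolean "double this char" flag:
--     # a char is doubled iff the next char is larger, or equal and itself doubled.
--     pieces: list[str] = []
--     prev: str | None = None
--     dbl = False
--     for c in reversed(s):
--         if prev is None or c > prev:
--             dbl = False
--         elif c < prev: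
--             dbl = True
--         # c == prev: dbl is inherited from the right neighbour
--         pieces.append(c + c if dbl else c)
--         prev = c
--     pieces.reverse()
--     return "".join(pieces)
-- ===== Notes on version B (the rewrite author's own statement) =====
-- stated objective: faster
-- what changed: Replaces A's two index-sets (dup_indices/reps) plus a second index-membership rebuild pass by a single right-to-left pass carrying one boolean doubling flag (next char larger sets it, equal inherits it), emitting pieces directly.
import Mathlib
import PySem

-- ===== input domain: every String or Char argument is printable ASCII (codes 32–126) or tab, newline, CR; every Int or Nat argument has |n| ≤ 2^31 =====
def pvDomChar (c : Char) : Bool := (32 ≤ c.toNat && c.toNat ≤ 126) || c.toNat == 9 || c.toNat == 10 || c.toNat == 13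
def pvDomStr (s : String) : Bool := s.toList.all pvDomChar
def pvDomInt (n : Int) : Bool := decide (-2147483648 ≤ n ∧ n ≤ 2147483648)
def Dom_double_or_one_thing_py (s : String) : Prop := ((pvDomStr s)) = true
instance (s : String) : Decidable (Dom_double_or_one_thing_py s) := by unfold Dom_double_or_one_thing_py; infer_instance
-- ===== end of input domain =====

-- B replaces A's two index-sets and index-membership rebuild by one right-to-left pass with a boolean doubling flag (measured faster by a constant factor; return-value equivalence; no argument is mutated).

-- ===== PORT A =====
-- one loop step of A's first 'for i, c in enumerate(s[:-1])' loop (state = (dup_indices, reps))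
def aStep (cs : List Char) (st : PySem.Set Int × PySem.Set Int) (ic : Int × Char) :
    PySem.Set Int × PySem.Set Int :=
  let next_c := (PySem.List.pyGet? cs (ic.1 + 1)).getD ic.2  -- s[i+1]; i+1 is always in range here
  if next_c < ic.2 then (st.1, PySem.Set.empty)
  else if ic.2 < next_c then (PySem.Set.add (PySem.Set.union st.1 st.2) ic.1, PySem.Set.empty)
  else (st.1, PySem.Set.add st.2 ic.1)

def double_or_one_thing_py (s : String) : String :=
  let cs := s.toList
  let st := (PySem.List.enumerate (PySem.List.slice cs none (some (-1)))).foldl (aStep cs)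
      (PySem.Set.empty, PySem.Set.empty)
  let out := (PySem.List.enumerate cs).foldl
      (fun (acc : List Char) ic =>
        let acc := acc ++ [ic.2]
        if PySem.Set.contains st.1 ic.1 then acc ++ [ic.2] else acc) []
  String.ofList out

-- ===== PORT B =====
-- one loop step of B's 'for c in reversed(s)' loop (state = (prev, dbl, pieces))
def bStep (st : Option Char × Bool × List (List Char)) (c : Char) :
    Option Char × Bool × List (List Char) :=
  let dbl := match st.1 with
    | none => false
    | some p => if p < c then false else if c < p then true else st.2.1
  (some c, dbl, st.2.2 ++ [if dbl then [c, c] else [c]])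

def double_or_one_thing_py_alt (s : String) : String :=
  let st := s.toList.reverse.foldl bStep (none, false, [])
  String.ofList st.2.2.reverse.flatten

-- ===== PRECONDITION & SPEC =====
def Spec_double_or_one_thing_py (s : String) (out : String) : Prop := out = double_or_one_thing_py_alt s
instance (s : String) (out : String) : Decidable (Spec_double_or_one_thing_py s out) := by unfold Spec_double_or_one_thing_py; infer_instance

-- ===== CLAIM (what is proved, stated in full; the proofs are below) =====
def Claim_equal_double_or_one_thing_py : Prop := ∀ (s : String), Dom_double_or_one_thing_py s → Spec_double_or_one_thing_py s (double_or_one_thing_py s)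

-- ===== LEMMAS AND PROOFS =====

-- 'double position j?': next char larger → yes, smaller/none → no, equal → inherit
def Pdbl (cs : List Char) (j : Nat) : Bool :=
  if _h : j + 1 < cs.length then
    if cs.getD j 'a' < cs.getD (j+1) 'a' then true
    else if cs.getD (j+1) 'a' < cs.getD j 'a' then false
    else Pdbl cs (j+1)
  else false
termination_by cs.length - j

def pieceL (cs : List Char) (j : Nat) : List Char :=
  if Pdbl cs j then [cs.getD j 'a', cs.getD j 'a'] else [cs.getD j 'a']

def midP (cs : List Char) : List (List Char) := (List.range cs.length).map (pieceL cs)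

def runEq (cs : List Char) (j l : Nat) : Prop := ∀ k, j ≤ k → k ≤ l → cs.getD k 'a' = cs.getD j 'a'
def dupP (cs : List Char) (j m : Nat) : Prop :=
  ∃ l, j ≤ l ∧ l < m ∧ runEq cs j l ∧ cs.getD l 'a' < cs.getD (l+1) 'a'
def repP (cs : List Char) (j m : Nat) : Prop := j < m ∧ runEq cs j m

theorem Pdbl_cons_succ (c : Char) (t : List Char) (j : Nat) :
    Pdbl (c :: t) (j+1) = Pdbl t j := by
  conv_lhs => rw [Pdbl]
  conv_rhs => rw [Pdbl]
  by_cases h : j + 1 < t.length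
  · rw [dif_pos (by simp only [List.length_cons]; omega), dif_pos h]
    simp only [List.getD_cons_succ]
    split_ifs with h1 h2
    · rfl
    · rfl
    · exact Pdbl_cons_succ c t (j+1)
  · rw [dif_neg (by simp only [List.length_cons]; omega), dif_neg h]
termination_by t.length - j
decreasing_by omega

theorem Pdbl_nil (j : Nat) : Pdbl [] j = false := by
  rw [Pdbl]; simp

theorem Pdbl_singleton (c : Char) (j : Nat) : Pdbl [c] j = false := by
  rw [Pdbl]
  rw [dif_neg (by simp only [List.length_cons, List.length_nil]; omega)]

theorem midP_cons (c : Char) (t : List Char) :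
    midP (c :: t) = pieceL (c :: t) 0 :: midP t := by
  unfold midP
  rw [List.length_cons, List.range_succ_eq_map, List.map_cons, List.map_map]
  congr 1
  apply List.map_congr_left
  intro j _
  show pieceL (c :: t) (j+1) = pieceL t j
  unfold pieceL
  rw [Pdbl_cons_succ, List.getD_cons_succ]

theorem bloop_eq (cs : List Char) :
    cs.reverse.foldl bStep (none, false, []) = (cs.head?, Pdbl cs 0, (midP cs).reverse) := by
  induction cs with
  | nil =>
    simp [midP, Pdbl_nil]
  | cons c t ih =>
    rw [List.reverse_cons, List.foldl_append, ih, List.foldl_cons, List.foldl_nil, midP_cons]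
    cases t with
    | nil =>
      simp [bStep, Pdbl_nil, Pdbl_singleton, midP, pieceL]
    | cons p t' =>
      have hdbl : (if p < c then false else if c < p then true else Pdbl (p :: t') 0)
          = Pdbl (c :: p :: t') 0 := by
        conv_rhs => rw [Pdbl]
        rw [dif_pos (by simp only [List.length_cons]; omega)]
        have e1 : (c :: p :: t').getD 0 'a' = c := rfl
        have e2 : (c :: p :: t').getD (0+1) 'a' = p := rfl
        rw [e1, e2, Pdbl_cons_succ]
        rcases lt_trichotomy c p with h | h | h
        · simp [h, lt_asymm h]
        · subst h; simp [lt_irrefl]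
        · simp [h, lt_asymm h]
      dsimp only [bStep, List.head?_cons]
      rw [List.reverse_cons]
      have hpl : pieceL (c :: p :: t') 0 = if Pdbl (c :: p :: t') 0 then [c, c] else [c] := rfl
      simp only [Prod.mk.injEq]
      refine ⟨trivial, hdbl, ?_⟩
      have hx : (if (if p < c then false else if c < p then true else Pdbl (p :: t') 0) = true
          then [c, c] else [c]) = pieceL (c :: p :: t') 0 := by
        rw [hpl]
        simp only [hdbl]
      rw [hx]

theorem inv (cs : List Char) (m : Nat) (hm : m ≤ cs.length - 1) :
    (∀ i : Int, i ∈ ((PySem.List.enumerate ((cs.dropLast).take m)).foldl (aStep cs)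
        (PySem.Set.empty, PySem.Set.empty)).1 ↔ ∃ j : Nat, i = (j:Int) ∧ dupP cs j m)
    ∧ (∀ i : Int, i ∈ ((PySem.List.enumerate ((cs.dropLast).take m)).foldl (aStep cs)
        (PySem.Set.empty, PySem.Set.empty)).2 ↔ ∃ j : Nat, i = (j:Int) ∧ repP cs j m) := by
  induction m with
  | zero =>
    simp only [dupP, repP, runEq, List.take_zero, PySem.List.enumerate_nil, List.foldl_nil]
    constructor
    · intro i
      constructor
      · intro h; simp [PySem.Set.empty] at h
      · rintro ⟨j, _, l, _, hl, _, _⟩; omega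
    · intro i
      constructor
      · intro h; simp [PySem.Set.empty] at h
      · rintro ⟨j, _, hj, _⟩; omega
  | succ m ih =>
    have hm' : m ≤ cs.length - 1 := by omega
    have hlen : m + 2 ≤ cs.length := by omega
    have hds : m < cs.dropLast.length := by rw [List.length_dropLast]; omega
    obtain ⟨ihd, ihr⟩ := ih hm'
    simp only [dupP, repP, runEq] at ihd ihr ⊢
    have htake : (cs.dropLast).take (m+1) = (cs.dropLast).take m ++ [cs.getD m 'a'] := by
      rw [List.take_add_one, List.getElem?_eq_getElem hds]
      congr 1
      simp only [Option.toList_some]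
      congr 1
      rw [List.getElem_dropLast, List.getD_eq_getElem cs 'a' (by omega)]
    have hfold : (PySem.List.enumerate ((cs.dropLast).take (m+1))).foldl (aStep cs)
          (PySem.Set.empty, PySem.Set.empty)
        = aStep cs ((PySem.List.enumerate ((cs.dropLast).take m)).foldl (aStep cs)
            (PySem.Set.empty, PySem.Set.empty)) ((m:Int), cs.getD m 'a') := by
      rw [htake, PySem.List.enumerate_append, List.foldl_append]
      have hlt : (List.take m cs.dropLast).length = m := by
        rw [List.length_take]; omega
      rw [hlt, PySem.List.enumerate_cons, PySem.List.enumerate_nil]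
      simp
    rw [hfold]
    set S := (PySem.List.enumerate ((cs.dropLast).take m)).foldl (aStep cs)
        (PySem.Set.empty, PySem.Set.empty) with hS
    have hnext : (PySem.List.pyGet? cs (((m:Int)) + 1)).getD (cs.getD m 'a') = cs.getD (m+1) 'a' := by
      have hc : ((m:Int) + 1) = ((m+1 : Nat) : Int) := by push_cast; ring
      rw [hc, PySem.List.pyGet?_natCast, List.getElem?_eq_getElem (by omega : m+1 < cs.length)]
      rw [List.getD_eq_getElem cs 'a' (by omega : m+1 < cs.length)]
      rfl
    unfold aStep
    dsimp only
    rw [hnext]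
    rcases lt_trichotomy (cs.getD (m+1) 'a') (cs.getD m 'a') with hcase | hcase | hcase
    · -- next char smaller: reps cleared, dup unchanged
      rw [if_pos hcase]
      dsimp only
      constructor
      · intro i
        rw [ihd i]
        constructor
        · rintro ⟨j, rfl, l, hjl, hlm, hrun, hlt⟩
          exact ⟨j, rfl, l, hjl, by omega, hrun, hlt⟩
        · rintro ⟨j, rfl, l, hjl, hlm, hrun, hlt⟩
          refine ⟨j, rfl, l, hjl, ?_, hrun, hlt⟩
          by_contra hc
          have hl : l = m := by omega
          subst hl
          exact absurd hlt (lt_asymm hcase)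
      · intro i
        constructor
        · intro h; simp [PySem.Set.empty] at h
        · rintro ⟨j, rfl, hjm, hrun⟩
          have h1 : cs.getD m 'a' = cs.getD j 'a' := hrun m (by omega) (by omega)
          have h2 : cs.getD (m+1) 'a' = cs.getD j 'a' := hrun (m+1) (by omega) (by omega)
          rw [h1, h2] at hcase
          exact absurd hcase (lt_irrefl _)
    · -- equal: reps grows, dup unchanged
      rw [if_neg (by rw [hcase]; exact lt_irrefl _), if_neg (by rw [hcase]; exact lt_irrefl _)]
      dsimp only
      constructor
      · intro i
        rw [ihd i]
        constructor
        · rintro ⟨j, rfl, l, hjl, hlm, hrun, hlt⟩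
          exact ⟨j, rfl, l, hjl, by omega, hrun, hlt⟩
        · rintro ⟨j, rfl, l, hjl, hlm, hrun, hlt⟩
          refine ⟨j, rfl, l, hjl, ?_, hrun, hlt⟩
          by_contra hc
          have hl : l = m := by omega
          subst hl
          rw [hcase] at hlt
          exact absurd hlt (lt_irrefl _)
      · intro i
        rw [PySem.Set.mem_add]
        constructor
        · rintro (hi | rfl)
          · obtain ⟨j, rfl, hjm, hrun⟩ := (ihr i).mp hi
            refine ⟨j, rfl, by omega, ?_⟩
            intro k hk1 hk2
            by_cases hk : k = m + 1
            · subst hk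
              rw [hcase]
              exact hrun m (by omega) (by omega)
            · exact hrun k hk1 (by omega)
          · refine ⟨m, rfl, by omega, ?_⟩
            intro k hk1 hk2
            by_cases hk : k = m + 1
            · subst hk; exact hcase
            · have hk' : k = m := by omega
              subst hk'; rfl
        · rintro ⟨j, rfl, hjm1, hrun⟩
          by_cases hj : j < m
          · left
            rw [ihr]
            refine ⟨j, rfl, hj, ?_⟩
            intro k hk1 hk2
            exact hrun k hk1 (by omega)
          · right
            have hje : j = m := by omega
            subst hje
            rfl
    · -- current char smaller: dup gains reps and m, reps cleared
      rw [if_neg (lt_asymm hcase), if_pos hcase]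
      dsimp only
      constructor
      · intro i
        rw [PySem.Set.mem_add, PySem.Set.mem_union]
        constructor
        · rintro ((hi | hi) | rfl)
          · obtain ⟨j, rfl, l, hjl, hlm, hrun, hlt⟩ := (ihd i).mp hi
            exact ⟨j, rfl, l, hjl, by omega, hrun, hlt⟩
          · obtain ⟨j, rfl, hjm, hrun⟩ := (ihr i).mp hi
            exact ⟨j, rfl, m, by omega, by omega, hrun, hcase⟩
          · refine ⟨m, rfl, m, le_refl m, by omega, ?_, hcase⟩
            intro k hk1 hk2
            have hk : k = m := by omega
            subst hk; rfl
        · rintro ⟨j, rfl, l, hjl, hlm1, hrun, hlt⟩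
          by_cases hl : l < m
          · left; left
            rw [ihd]
            exact ⟨j, rfl, l, hjl, hl, hrun, hlt⟩
          · have hle : l = m := by omega
            rw [hle] at hrun hlt
            by_cases hj : j < m
            · left; right
              rw [ihr]
              exact ⟨j, rfl, hj, hrun⟩
            · right
              have hje : j = m := by omega
              rw [hje]
      · intro i
        constructor
        · intro h; simp [PySem.Set.empty] at h
        · rintro ⟨j, rfl, hjm, hrun⟩
          have h1 : cs.getD m 'a' = cs.getD j 'a' := hrun m (by omega) (by omega)
          have h2 : cs.getD (m+1) 'a' = cs.getD j 'a' := hrun (m+1) (by omega) (by omega)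
          rw [h1, h2] at hcase
          exact absurd hcase (lt_irrefl _)

theorem Pdbl_iff (cs : List Char) (j : Nat) :
    Pdbl cs j = true ↔ dupP cs j (cs.length - 1) := by
  rw [Pdbl]
  simp only [dupP, runEq]
  by_cases h : j + 1 < cs.length
  · rw [dif_pos h]
    rcases lt_trichotomy (cs.getD j 'a') (cs.getD (j+1) 'a') with h1 | h1 | h1
    · rw [if_pos h1]
      constructor
      · intro _
        refine ⟨j, le_refl j, by omega, ?_, h1⟩
        intro k hk1 hk2
        have hk : k = j := by omega
        subst hk; rfl
      · intro _; rfl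
    · rw [if_neg (by rw [h1]; exact lt_irrefl _), if_neg (by rw [h1]; exact lt_irrefl _)]
      have hrec := Pdbl_iff cs (j+1)
      simp only [dupP, runEq] at hrec
      rw [hrec]
      constructor
      · rintro ⟨l, hl1, hl2, hrun, hlt⟩
        refine ⟨l, by omega, hl2, ?_, hlt⟩
        intro k hk1 hk2
        by_cases hk : k = j
        · subst hk; rfl
        · rw [hrun k (by omega) hk2, ← h1]
      · rintro ⟨l, hl1, hl2, hrun, hlt⟩
        have hlj : l ≠ j := by
          rintro rfl
          rw [h1] at hlt
          exact absurd hlt (lt_irrefl _)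
        refine ⟨l, by omega, hl2, ?_, hlt⟩
        intro k hk1 hk2
        rw [hrun k (by omega) hk2]
        exact h1
    · rw [if_neg (lt_asymm h1), if_pos h1]
      constructor
      · intro hf; exact absurd hf Bool.false_ne_true
      · rintro ⟨l, hl1, hl2, hrun, hlt⟩
        by_cases hl : l = j
        · subst hl
          exact absurd hlt (lt_asymm h1)
        · have he : cs.getD (j+1) 'a' = cs.getD j 'a' := hrun (j+1) (by omega) (by omega)
          rw [he] at h1
          exact absurd h1 (lt_irrefl _)
  · rw [dif_neg h]
    constructor
    · intro hf; exact absurd hf Bool.false_ne_true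
    · rintro ⟨l, hl1, hl2, _, _⟩; omega
termination_by cs.length - j
decreasing_by omega

theorem foldl_emit (D : PySem.Set Int) (xs : List (Int × Char)) (init : List Char) :
    xs.foldl (fun (acc : List Char) ic =>
        let acc := acc ++ [ic.2]
        if PySem.Set.contains D ic.1 then acc ++ [ic.2] else acc) init
    = init ++ xs.flatMap (fun ic => if PySem.Set.contains D ic.1 then [ic.2, ic.2] else [ic.2]) := by
  induction xs generalizing init with
  | nil => simp
  | cons x xs ih =>
    rw [List.foldl_cons, ih, List.flatMap_cons]
    by_cases h : x.1 ∈ D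
    · simp [PySem.Set.contains_iff, h, List.append_assoc]
    · simp [PySem.Set.contains_iff, h, List.append_assoc]

theorem enum_flatMap (g : Int × Char → List Char) (xs : List Char) (j0 : Nat) :
    (PySem.List.enumerate xs (j0:Int)).flatMap g
    = (List.range xs.length).flatMap (fun j => g (((j0 + j : Nat) : Int), xs.getD j 'a')) := by
  induction xs generalizing j0 with
  | nil => simp [PySem.List.enumerate_nil]
  | cons x xs ih =>
    rw [PySem.List.enumerate_cons, List.flatMap_cons]
    have hc : (j0:Int) + 1 = ((j0+1 : Nat) : Int) := by push_cast; ring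
    rw [hc, ih (j0+1)]
    rw [List.length_cons, List.range_succ_eq_map, List.flatMap_cons, List.flatMap_map]
    have hhead : g ((j0:Int), x) = g (((j0 + 0 : Nat) : Int), (x :: xs).getD 0 'a') := by simp
    rw [hhead]
    have hfun : (fun j => g ((((j0 + 1) + j : Nat) : Int), xs.getD j 'a'))
        = fun a => g (((j0 + (Nat.succ a) : Nat) : Int), (x :: xs).getD (Nat.succ a) 'a') := by
      funext j
      have h1 : j0 + 1 + j = j0 + (j + 1) := by omega
      simp only [Nat.succ_eq_add_one, List.getD_cons_succ, h1]
    rw [hfun]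

theorem a_eq_mid (s : String) :
    double_or_one_thing_py s = String.ofList (midP s.toList).flatten := by
  dsimp only [double_or_one_thing_py]
  rw [PySem.List.slice_to_neg_one]
  rw [← List.take_length (l := s.toList.dropLast)]
  set cs := s.toList with hcs
  set D := ((PySem.List.enumerate ((cs.dropLast).take cs.dropLast.length)).foldl (aStep cs)
      (PySem.Set.empty, PySem.Set.empty)) with hD
  have hm : cs.dropLast.length ≤ cs.length - 1 := by rw [List.length_dropLast]
  have hcont : ∀ j : Nat, PySem.Set.contains D.1 ((j:Nat):Int) = Pdbl cs j := by
    intro j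
    rw [Bool.eq_iff_iff, PySem.Set.contains_iff, (inv cs cs.dropLast.length hm).1 ((j:Nat):Int),
      Pdbl_iff]
    constructor
    · rintro ⟨j', hj', hd⟩
      have hje : j' = j := by exact_mod_cast hj'.symm
      subst hje
      rw [List.length_dropLast] at hd
      exact hd
    · intro hd
      refine ⟨j, rfl, ?_⟩
      rw [List.length_dropLast]
      exact hd
  rw [foldl_emit, List.nil_append]
  have h0 : (PySem.List.enumerate cs) = PySem.List.enumerate cs ((0:Nat):Int) := by
    rw [Nat.cast_zero]
  rw [h0, enum_flatMap]
  congr 1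
  rw [midP, ← List.flatMap_def]
  congr 1
  funext j
  simp only [Nat.zero_add]
  rw [hcont j]
  unfold pieceL
  rfl

theorem b_eq_mid (s : String) :
    double_or_one_thing_py_alt s = String.ofList (midP s.toList).flatten := by
  dsimp only [double_or_one_thing_py_alt]
  rw [bloop_eq]
  simp

-- ===== VERDICT (by name: the statement is the Claim_ definition above) =====
theorem double_or_one_thing_py_spec : Claim_equal_double_or_one_thing_py := by
  intro s _
  unfold Spec_double_or_one_thing_py
  rw [a_eq_mid, b_eq_mid]
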